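-- pv_equiv track=rewrite | github.com/playerunknow/Security | lab_8.py | text_to_binary_array
-- ===== SOURCE A (Python) =====
-- def text_to_binary_array(message):
--     byte_data = message.encode('utf-8')
--     bit_list = []
--     for byte_val in byte_data:
--         binary_rep = bin(byte_val)[2:].zfill(8)
--         for digit in binary_rep:
--             bit_list.append(int(digit))
--     return bit_list
-- ===== SOURCE B (Python) =====
-- _BIT_ROWS = [[(b >> s) & 1 for s in (7, 6, 5, 4, 3, 2, 1, 0)] for b in range(256)]
--
-- def text_to_binary_array(message):
--     return [bit for byte in message.encode('utf-8') for bit in _BIT_ROWS[byte]]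
-- ===== Notes on version B (the rewrite author's own statement) =====
-- stated objective: faster
-- what changed: Replaces A's per-byte string formatting (bin/zfill) and nested per-digit append loop with a 256-row bit table precomputed by shifts and a single flattening comprehension over the UTF-8 bytes.
import Mathlib
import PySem

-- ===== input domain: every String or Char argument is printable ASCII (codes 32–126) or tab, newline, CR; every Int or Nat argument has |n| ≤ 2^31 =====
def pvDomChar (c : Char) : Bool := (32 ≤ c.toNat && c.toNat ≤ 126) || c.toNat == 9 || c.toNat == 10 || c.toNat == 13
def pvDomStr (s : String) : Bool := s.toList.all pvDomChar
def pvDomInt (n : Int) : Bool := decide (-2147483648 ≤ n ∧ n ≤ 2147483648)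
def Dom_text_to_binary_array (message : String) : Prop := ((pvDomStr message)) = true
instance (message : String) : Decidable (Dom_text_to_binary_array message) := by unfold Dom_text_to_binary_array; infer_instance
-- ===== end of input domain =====

-- B replaces A's per-byte string formatting (bin/zfill) and nested per-digit appends with a
-- 256-row bit table built once by shifts and a single flattening pass over the bytes (faster).

-- ===== PORT A =====
-- message.encode('utf-8'): on the ASCII domain each char is one byte equal to its code (exact on Dom)
def pvEncode (message : String) : List Nat := message.toList.map (fun c => c.toNat)

-- bin(byte_val)[2:].zfill(8) : binary digits (Nat.toDigits 2 = Python's bin digits), left-padded to 8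
def pvBinRep (b : Nat) : List Char := List.replicate (8 - (Nat.toDigits 2 b).length) '0' ++ Nat.toDigits 2 b

def text_to_binary_array (message : String) : List Int :=
  let byte_data := pvEncode message
  byte_data.foldl (fun bit_list byte_val =>
    (pvBinRep byte_val).foldl (fun bl digit => bl ++ [((digit.toNat : Int) - 48)]) bit_list) []

-- ===== PORT B =====
-- _BIT_ROWS = [[(b >> s) & 1 for s in (7,...,0)] for b in range(256)]
def pvBitRows : List (List Int) :=
  (List.range 256).map (fun b =>
    [7, 6, 5, 4, 3, 2, 1, 0].map (fun s => (((b >>> s) &&& 1 : Nat) : Int)))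

def text_to_binary_array_alt (message : String) : List Int :=
  -- _BIT_ROWS[byte]: every byte is < 256, so the index is always in range (getD is never the default)
  (pvEncode message).flatMap (fun byte => pvBitRows.getD byte [])

-- ===== PRECONDITION & SPEC =====
def Spec_text_to_binary_array (message : String) (out : List Int) : Prop := out = text_to_binary_array_alt message
instance (message : String) (out : List Int) : Decidable (Spec_text_to_binary_array message out) := by unfold Spec_text_to_binary_array; infer_instance

-- ===== CLAIM (what is proved, stated in full; the proofs are below) =====
def Claim_equal_text_to_binary_array : Prop := ∀ (message : String), Dom_text_to_binary_array message → Spec_text_to_binary_array message (text_to_binary_array message)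

-- ===== LEMMAS AND PROOFS =====

-- A's per-byte bit list
def pvByteBits (b : Nat) : List Int := (pvBinRep b).map (fun digit => ((digit.toNat : Int) - 48))

-- for a byte < 256, A's string-formatted bits are the 8 bits MSB-first
set_option maxRecDepth 10000 in
theorem pvByteBits_eq : ∀ b < 256,
    pvByteBits b = [7, 6, 5, 4, 3, 2, 1, 0].map (fun s => (((b >>> s) &&& 1 : Nat) : Int)) := by
  decide

theorem row_eq (b : Nat) (hb : b < 256) : pvBitRows.getD b [] = pvByteBits b := by
  unfold pvBitRows
  rw [List.getD, List.getElem?_map, List.getElem?_range hb]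
  simp [pvByteBits_eq b hb]

theorem a_flatMap (bs : List Nat) :
    bs.foldl (fun bit_list byte_val =>
      (pvBinRep byte_val).foldl (fun bl digit => bl ++ [((digit.toNat : Int) - 48)]) bit_list) []
    = bs.flatMap pvByteBits := by
  have hf : (fun (bit_list : List Int) (byte_val : Nat) =>
      (pvBinRep byte_val).foldl (fun bl digit => bl ++ [((digit.toNat : Int) - 48)]) bit_list)
      = (fun bit_list byte_val => bit_list ++ pvByteBits byte_val) := by
    funext bl bv
    exact PySem.List.foldl_append_singleton_eq_map _ (pvBinRep bv) bl
  rw [hf, PySem.List.foldl_append_eq_flatMap]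
  simp

-- ===== VERDICT (by name: the statement is the Claim_ definition above) =====
theorem text_to_binary_array_spec : Claim_equal_text_to_binary_array := by
  intro message hdom
  unfold Spec_text_to_binary_array text_to_binary_array text_to_binary_array_alt
  rw [a_flatMap]
  refine List.flatMap_congr ?_
  intro b hb
  have hlt : b < 256 := by
    simp only [pvEncode, List.mem_map] at hb
    obtain ⟨c, hc, rfl⟩ := hb
    have hdom' : pvDomChar c = true := (List.all_eq_true.mp hdom) c hc
    simp only [pvDomChar, Bool.or_eq_true, Bool.and_eq_true, decide_eq_true_eq, beq_iff_eq] at hdom'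
    omega
  exact (row_eq b hlt).symm
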